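-- pv_equiv track=rewrite | github.com/mmmurka/Laba_TiTak | 1.2.py | decode_text
-- ===== SOURCE A (Python) =====
-- def decode_text(encoded_text, code_dict):
--     decoded_text = ""
--     current_code = ""
--     for bit in encoded_text:
--         current_code += bit
--         for char, code in code_dict.items():
--             if code == current_code:
--                 decoded_text += char
--                 current_code = ""
--                 break
--     return decoded_text
-- ===== SOURCE B (Python) =====
-- def decode_text(encoded_text, code_dict):
--     # Build a trie of codes once (children keyed by character; terminal char
--     # stored under the key None, first insertion wins), then decode with a
--     # single descending walk: one child step per input character, emitting and
--     # resetting to the root whenever a terminal node is reached.  Once the walk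
--     # falls off the trie no further code can ever match, so decoding stops.
--     root = {}
--     for char, code in code_dict.items():
--         node = root
--         for c in code:
--             node = node.setdefault(c, {})
--         node.setdefault(None, char)
--     out = []
--     node = root
--     for bit in encoded_text:
--         node = node.get(bit)
--         if node is None:
--             break
--         if None in node:
--             out.append(node[None])
--             node = root
--     return "".join(out)
-- ===== Notes on version B (the rewrite author's own statement) =====
-- stated objective: faster
-- what changed: B builds a trie of the codes once (children in insertion order, terminal char set first-wins) and decodes with a single descending walk that emits and resets at terminal nodes and stops once the walk leaves the trie, instead of A's rescan of the whole dict after every character.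
import Mathlib
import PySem

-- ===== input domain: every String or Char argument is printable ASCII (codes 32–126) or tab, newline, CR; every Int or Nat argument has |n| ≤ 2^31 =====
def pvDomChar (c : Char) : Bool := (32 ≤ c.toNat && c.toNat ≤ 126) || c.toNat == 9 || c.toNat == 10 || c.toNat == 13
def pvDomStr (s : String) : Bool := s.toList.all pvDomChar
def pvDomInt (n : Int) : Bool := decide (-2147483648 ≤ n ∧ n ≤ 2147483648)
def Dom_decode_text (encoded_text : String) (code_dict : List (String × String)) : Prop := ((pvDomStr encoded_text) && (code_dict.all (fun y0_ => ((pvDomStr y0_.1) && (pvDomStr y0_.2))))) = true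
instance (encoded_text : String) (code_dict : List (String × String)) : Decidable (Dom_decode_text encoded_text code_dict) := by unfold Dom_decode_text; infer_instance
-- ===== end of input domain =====

-- B builds a trie of the codes once and decodes by a single descending walk
-- (emit & reset at terminal nodes; stop once off the trie), replacing A's
-- per-character rescan of the whole dict; return value proved identical.

-- ===== PORT A =====
-- A's inner `for char, code in code_dict.items(): if code == current_code: … break`
def pvFindChar (code_dict : List (String × String)) (cur : String) : Option String :=
  match code_dict with
  | [] => none
  | (ch, code) :: rest => if code = cur then some ch else pvFindChar rest cur

def decode_text (encoded_text : String) (code_dict : List (String × String)) : String :=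
  (encoded_text.toList.foldl (fun (st : String × String) bit =>
    let cur := st.2.push bit
    match pvFindChar code_dict cur with
    | some ch => (st.1 ++ ch, "")
    | none => (st.1, cur)) ("", "")).1

-- ===== PORT B =====
-- trie node: optional terminal char (Source B's key None) + children in insertion order
mutual
inductive PvTrie : Type where
  | node : Option String → PvChildren → PvTrie
inductive PvChildren : Type where
  | nil : PvChildren
  | cons : Char → PvTrie → PvChildren → PvChildren
end

-- children lookup (Source B's node.get(bit))
def PvChildren.find? : PvChildren → Char → Option PvTrie
  | .nil, _ => none
  | .cons c t rest, b => if c = b then some t else PvChildren.find? rest b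

-- replace the child keyed c (or append it): the write half of node.setdefault(c, {})
def PvChildren.set : PvChildren → Char → PvTrie → PvChildren
  | .nil, c, t => .cons c t .nil
  | .cons c' u rest, c, t => if c' = c then .cons c' t rest else .cons c' u (PvChildren.set rest c t)

def PvTrie.term : PvTrie → Option String
  | .node tm _ => tm

def PvTrie.child : PvTrie → Char → Option PvTrie
  | .node _ ch, b => PvChildren.find? ch b

-- Source B's insertion loop: descend/create one node per code char, then setdefault the terminal
def PvTrie.insert (t : PvTrie) (cs : List Char) (s : String) : PvTrie :=
  match t, cs with
  | .node tm ch, [] => .node (tm.or (some s)) ch      -- node.setdefault(None, char): first wins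
  | .node tm ch, c :: rest =>
      let sub := match PvChildren.find? ch c with      -- node.setdefault(c, {})
        | some u => u
        | none => PvTrie.node none PvChildren.nil
      .node tm (PvChildren.set ch c (PvTrie.insert sub rest s))
termination_by cs.length

-- Source B's trie-building loop over code_dict.items()
def pvBuild (code_dict : List (String × String)) : PvTrie :=
  code_dict.foldl (fun r p => r.insert p.2.toList p.1) (PvTrie.node none PvChildren.nil)

-- Source B's loop body; Python's `break` is ported as the absorbing dead state `none`
def pvStepB (root : PvTrie) (st : List String × Option PvTrie) (bit : Char) :
    List String × Option PvTrie :=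
  match st.2 with
  | none => st
  | some n =>
      match n.child bit with
      | none => (st.1, none)
      | some n' =>
          match n'.term with
          | some ch => (st.1 ++ [ch], some root)
          | none => (st.1, some n')

def decode_text_alt (encoded_text : String) (code_dict : List (String × String)) : String :=
  let root := pvBuild code_dict
  String.join ((encoded_text.toList.foldl (pvStepB root) ([], some root)).1)

-- ===== PRECONDITION & SPEC =====
def Spec_decode_text (encoded_text : String) (code_dict : List (String × String)) (out : String) : Prop := out = decode_text_alt encoded_text code_dict
instance (encoded_text : String) (code_dict : List (String × String)) (out : String) : Decidable (Spec_decode_text encoded_text code_dict out) := by unfold Spec_decode_text; infer_instance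

-- ===== CLAIM (what is proved, stated in full; the proofs are below) =====
def Claim_equal_decode_text : Prop := ∀ (encoded_text : String) (code_dict : List (String × String)), Dom_decode_text encoded_text code_dict → Spec_decode_text encoded_text code_dict (decode_text encoded_text code_dict)

-- ===== LEMMAS AND PROOFS =====

-- descend a path; terminal found at its end (proof-side characterisation of the trie)
def PvTrie.descend : PvTrie → List Char → Option PvTrie
  | t, [] => some t
  | t, c :: cs =>
      match t.child c with
      | some u => PvTrie.descend u cs
      | none => none

def pvTerm? (t : PvTrie) (l : List Char) : Option String :=
  (t.descend l).bind PvTrie.term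

theorem insert_cons (tm : Option String) (ch : PvChildren) (c : Char)
    (code' : List Char) (s : String) :
    PvTrie.insert (PvTrie.node tm ch) (c :: code') s
      = PvTrie.node tm (PvChildren.set ch c
          (PvTrie.insert (match PvChildren.find? ch c with
              | some u => u
              | none => PvTrie.node none PvChildren.nil) code' s)) := by
  rw [PvTrie.insert]

theorem find?_set_eq (ch : PvChildren) (c : Char) (t : PvTrie) :
    PvChildren.find? (PvChildren.set ch c t) c = some t :=
  match ch with
  | .nil => by simp [PvChildren.set, PvChildren.find?]
  | .cons c' u rest => by
      by_cases h : c' = c <;>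
        simp [PvChildren.set, PvChildren.find?, h, find?_set_eq rest c t]

theorem find?_set_ne (ch : PvChildren) (c b : Char) (t : PvTrie) (h : b ≠ c) :
    PvChildren.find? (PvChildren.set ch c t) b = PvChildren.find? ch b :=
  match ch with
  | .nil => by simp [PvChildren.set, PvChildren.find?, Ne.symm h]
  | .cons c' u rest => by
      by_cases hc : c' = c
      · subst hc
        simp [PvChildren.set, PvChildren.find?, Ne.symm h]
      · simp [PvChildren.set, PvChildren.find?, hc, find?_set_ne rest c b t h]

theorem pvTerm?_empty (l : List Char) :
    pvTerm? (PvTrie.node none PvChildren.nil) l = none := by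
  cases l <;>
    simp [pvTerm?, PvTrie.descend, PvTrie.child, PvChildren.find?, PvTrie.term]

theorem pvTerm?_cons (tm : Option String) (ch : PvChildren) (b : Char) (l : List Char) :
    pvTerm? (PvTrie.node tm ch) (b :: l)
      = match PvChildren.find? ch b with
        | some u => pvTerm? u l
        | none => none := by
  cases h : PvChildren.find? ch b <;>
    simp [pvTerm?, PvTrie.descend, PvTrie.child, h]

theorem pvTerm?_insert (code : List Char) (s : String) (t : PvTrie) (l : List Char) :
    pvTerm? (t.insert code s) l
      = if l = code then (pvTerm? t l).or (some s) else pvTerm? t l := by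
  induction code generalizing t l with
  | nil =>
      obtain ⟨tm, ch⟩ := t
      cases l with
      | nil => simp [PvTrie.insert, pvTerm?, PvTrie.descend, PvTrie.term]
      | cons b l' =>
          simp [PvTrie.insert, pvTerm?_cons]
  | cons c code' ih =>
      obtain ⟨tm, ch⟩ := t
      cases l with
      | nil => simp [insert_cons, pvTerm?, PvTrie.descend, PvTrie.term]
      | cons b l' =>
          rw [insert_cons]
          by_cases hb : b = c
          · subst hb
            rw [pvTerm?_cons, find?_set_eq]
            show pvTerm? ((match PvChildren.find? ch b with
                | some u => u
                | none => PvTrie.node none PvChildren.nil).insert code' s) l' = _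
            rw [ih, pvTerm?_cons]
            cases hfc : PvChildren.find? ch b with
            | some u => simp
            | none => simp [pvTerm?_empty]
          · rw [pvTerm?_cons, find?_set_ne _ _ _ _ hb, pvTerm?_cons]
            simp [hb]

theorem pvFind_eq_aux (d : List (String × String)) (t : PvTrie) (cur : String) :
    pvTerm? (d.foldl (fun r p => r.insert p.2.toList p.1) t) cur.toList
      = (pvTerm? t cur.toList).or (pvFindChar d cur) := by
  induction d generalizing t with
  | nil => simp [pvFindChar]
  | cons p rest ih =>
      obtain ⟨ch, code⟩ := p
      rw [List.foldl_cons, ih, pvTerm?_insert]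
      rw [show pvFindChar ((ch, code) :: rest) cur
            = if code = cur then some ch else pvFindChar rest cur from rfl]
      by_cases h : code = cur
      · subst h
        cases pvTerm? t code.toList <;> simp [Option.or]
      · have h2 : ¬ cur.toList = code.toList := fun hh => h (String.ext_iff.mpr hh.symm)
        simp [h, h2]

theorem pvFind_eq (d : List (String × String)) (cur : String) :
    pvFindChar d cur = pvTerm? (pvBuild d) cur.toList := by
  rw [pvBuild, pvFind_eq_aux, pvTerm?_empty]
  simp

theorem descend_snoc (t : PvTrie) (l : List Char) (b : Char) :
    t.descend (l ++ [b]) = (t.descend l).bind (fun n => n.child b) := by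
  induction l generalizing t with
  | nil =>
      cases h : t.child b <;> simp [PvTrie.descend, h]
  | cons c l' ih =>
      cases h : t.child c <;> simp [PvTrie.descend, h, ih]

theorem walk (d : List (String × String)) (l : List Char) (acc : String)
    (outL : List String) (cur : String) (h : String.join outL = acc) :
    String.join ((l.foldl (pvStepB (pvBuild d)) (outL, (pvBuild d).descend cur.toList)).1)
      = (l.foldl (fun (st : String × String) bit =>
          let c2 := st.2.push bit
          match pvFindChar d c2 with
          | some ch => (st.1 ++ ch, "")
          | none => (st.1, c2)) (acc, cur)).1 := by
  induction l generalizing acc outL cur with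
  | nil => simpa using h
  | cons b l' ih =>
      rw [List.foldl_cons, List.foldl_cons]
      have htl : (cur.push b).toList = cur.toList ++ [b] := by simp
      have hfind : pvFindChar d (cur.push b) = pvTerm? (pvBuild d) ((cur.push b).toList) :=
        pvFind_eq d (cur.push b)
      cases hn : (pvBuild d).descend cur.toList with
      | none =>
          have hterm : pvFindChar d (cur.push b) = none := by
            rw [hfind, pvTerm?, htl, descend_snoc, hn]; rfl
          simp only [pvStepB, hterm]
          have hthis := ih acc outL (cur.push b) h
          rw [htl, descend_snoc, hn] at hthis
          simpa using hthis
      | some n =>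
          cases hc : n.child b with
          | none =>
              have hterm : pvFindChar d (cur.push b) = none := by
                rw [hfind, pvTerm?, htl, descend_snoc, hn]; simp [hc]
              simp only [pvStepB, hterm, hc]
              have hthis := ih acc outL (cur.push b) h
              rw [htl, descend_snoc, hn] at hthis
              simpa [hc] using hthis
          | some n' =>
              cases ht : n'.term with
              | some chx =>
                  have hterm : pvFindChar d (cur.push b) = some chx := by
                    rw [hfind, pvTerm?, htl, descend_snoc, hn]; simp [hc, ht]
                  simp only [pvStepB, hterm, hc, ht]
                  have hroot : some (pvBuild d) = (pvBuild d).descend ("".toList) := by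
                    simp [PvTrie.descend]
                  have hjoin : String.join (outL ++ [chx]) = acc ++ chx := by
                    rw [← h]; simp [String.join, List.foldl_append]
                  rw [hroot]
                  exact ih (acc ++ chx) (outL ++ [chx]) "" hjoin
              | none =>
                  have hterm : pvFindChar d (cur.push b) = none := by
                    rw [hfind, pvTerm?, htl, descend_snoc, hn]; simp [hc, ht]
                  simp only [pvStepB, hterm, hc, ht]
                  have hthis := ih acc outL (cur.push b) h
                  rw [htl, descend_snoc, hn] at hthis
                  simpa [hc] using hthis

-- ===== VERDICT (by name: the statement is the Claim_ definition above) =====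
theorem decode_text_spec : Claim_equal_decode_text := by
  intro t d _
  show decode_text t d = decode_text_alt t d
  have h0 : decode_text_alt t d
      = String.join ((t.toList.foldl (pvStepB (pvBuild d))
          ([], (pvBuild d).descend ("".toList))).1) := rfl
  rw [h0]
  exact (walk d t.toList "" [] "" rfl).symm
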